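-- pv_equiv track=rewrite | github.com/arnavam/Similarity-finder | a_streamlit_app.py | calculate_overall_match
-- ===== SOURCE A (Python) =====
-- from collections import Counter
--
-- def calculate_overall_match(score_values):
--     """
--     Calculate overall score using Mode/Max logic:
--     - If max frequency == 1 (all unique): take max score
--     - If mode exists: take highest mode
--     """
--     if not score_values:
--         return 0
--
--     counts = Counter(score_values)
--     max_freq = max(counts.values())
--
--     if max_freq == 1:
--         # All unique -> take highest score
--         return max(score_values)
--     else:
--         # Mode exists -> take highest mode (in case of tie)
--         modes = [k for k, v in counts.items() if v == max_freq]
--         return max(modes)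
-- ===== SOURCE B (Python) =====
-- def calculate_overall_match(score_values):
--     # Sort, then scan runs of equal values: the answer is the value of the
--     # longest run, with later (= higher) runs winning ties.
--     if not score_values:
--         return 0
--     xs = sorted(score_values)
--     cur_val, cur_cnt = xs[0], 1
--     best_val, best_cnt = xs[0], 1
--     for x in xs[1:]:
--         if x == cur_val:
--             cur_cnt += 1
--         else:
--             cur_val, cur_cnt = x, 1
--         if cur_cnt >= best_cnt:
--             best_val, best_cnt = cur_val, cur_cnt
--     return best_val
-- ===== Notes on version B (the rewrite author's own statement) =====
-- stated objective: alternative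
-- what changed: Replaces A's Counter + max-frequency scan + all-unique branch + modes filter by sorting the list and scanning runs of equal values in one pass, keeping the longest run seen (later, i.e. higher, runs win ties); no hash counting at all.
import Mathlib
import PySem

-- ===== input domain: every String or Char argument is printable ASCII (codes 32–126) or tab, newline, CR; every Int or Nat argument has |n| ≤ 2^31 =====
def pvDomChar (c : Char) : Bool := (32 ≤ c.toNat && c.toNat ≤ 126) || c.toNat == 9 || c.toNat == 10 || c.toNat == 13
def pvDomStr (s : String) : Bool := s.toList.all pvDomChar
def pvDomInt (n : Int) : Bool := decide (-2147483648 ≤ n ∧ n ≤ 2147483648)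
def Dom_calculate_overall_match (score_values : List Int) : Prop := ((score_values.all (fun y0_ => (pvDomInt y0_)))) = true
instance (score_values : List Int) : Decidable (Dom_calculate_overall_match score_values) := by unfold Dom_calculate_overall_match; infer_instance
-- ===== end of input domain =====

-- B replaces A's Counter + max-frequency branch + modes filter by sorting the list and
-- scanning runs of equal values, keeping the longest (later runs win ties); objective: alternative.

-- ===== PORT A =====
-- Each '.getD 0' only makes Python's max total; its branch is unreachable (the list is nonempty there).
def calculate_overall_match (score_values : List Int) : Int :=
  if score_values = [] then 0
  else
    let counts := PySem.Dict.counter score_values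
    let max_freq := (PySem.List.max? counts.values (fun y => y)).getD 0
    if max_freq = 1 then
      (PySem.List.max? score_values (fun y => y)).getD 0
    else
      let modes := (counts.items.filter (fun p => p.2 == max_freq)).map (fun p => p.1)
      (PySem.List.max? modes (fun y => y)).getD 0

-- ===== PORT B =====
-- The loop body of Source B: update the current run (cur_val, cur_cnt), then the best run.
-- State: (cur_val, cur_cnt, best_val, best_cnt).
def altStep (s : Int × Int × Int × Int) (x : Int) : Int × Int × Int × Int :=
  let (cv, cc) := if x = s.1 then (s.1, s.2.1 + 1) else (x, 1)
  if s.2.2.2 ≤ cc then (cv, cc, cv, cc) else (cv, cc, s.2.2.1, s.2.2.2)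

-- 'xs = sorted(score_values)'; the [] match arm is unreachable (sorted list of a nonempty list).
def calculate_overall_match_alt (score_values : List Int) : Int :=
  if score_values = [] then 0
  else
    match PySem.List.sorted score_values (fun y => y) with
    | [] => 0
    | x0 :: rest => (rest.foldl altStep (x0, 1, x0, 1)).2.2.1

-- ===== PRECONDITION & SPEC =====
def Spec_calculate_overall_match (score_values : List Int) (out : Int) : Prop := out = calculate_overall_match_alt score_values
instance (score_values : List Int) (out : Int) : Decidable (Spec_calculate_overall_match score_values out) := by unfold Spec_calculate_overall_match; infer_instance

-- ===== CLAIM (what is proved, stated in full; the proofs are below) =====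
def Claim_equal_calculate_overall_match : Prop := ∀ (score_values : List Int), Dom_calculate_overall_match score_values → Spec_calculate_overall_match score_values (calculate_overall_match score_values)

-- ===== LEMMAS AND PROOFS =====

-- m is "the" answer for xs: a member whose (count, value) pair lexicographically dominates all.
def IsAns (xs : List Int) (m : Int) : Prop :=
  m ∈ xs ∧ ∀ y ∈ xs, xs.count y < xs.count m ∨ (xs.count y = xs.count m ∧ y ≤ m)

lemma IsAns_unique (xs : List Int) (m m' : Int) (h : IsAns xs m) (h' : IsAns xs m') : m = m' := by
  obtain ⟨hm, hdom⟩ := h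
  obtain ⟨hm', hdom'⟩ := h'
  have h1 := hdom m' hm'
  have h2 := hdom' m hm
  rcases h1 with h1 | ⟨_, h1⟩ <;> rcases h2 with h2 | ⟨_, h2⟩ <;> omega

-- Invariant of Source B's run-scanning loop over the processed (sorted) prefix `seen`:
-- s = (cur_val, cur_cnt, best_val, best_cnt).
def InvP (seen : List Int) (s : Int × Int × Int × Int) : Prop :=
  s.1 ∈ seen ∧ (∀ y ∈ seen, y ≤ s.1) ∧ s.2.1 = (seen.count s.1 : Int) ∧
  s.2.2.1 ∈ seen ∧ s.2.2.2 = (seen.count s.2.2.1 : Int) ∧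
  (∀ y ∈ seen, seen.count y < seen.count s.2.2.1 ∨ (seen.count y = seen.count s.2.2.1 ∧ y ≤ s.2.2.1))

lemma step_inv (seen : List Int) (s : Int × Int × Int × Int) (x : Int)
    (hx : ∀ y ∈ seen, y ≤ x) (hinv : InvP seen s) : InvP (seen ++ [x]) (altStep s x) := by
  obtain ⟨cv, cc, bv, bc⟩ := s
  simp only [InvP] at hinv
  obtain ⟨hcv, hle, hcc, hbv, hbc, hdom⟩ := hinv
  have hcnt : ∀ y : Int, (seen ++ [x]).count y = seen.count y + (if y = x then 1 else 0) := by
    intro y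
    rw [List.count_append]
    congr 1
    by_cases h : y = x
    · subst h; simp
    · simp [List.count_singleton, h]
      exact fun hh => h hh.symm
  by_cases hxc : x = cv
  · -- same run continues
    subst hxc
    have hcnt_x : (seen ++ [x]).count x = seen.count x + 1 := by rw [hcnt]; simp
    by_cases hbr : bc ≤ cc + 1
    · have hstep : altStep (x, cc, bv, bc) x = (x, cc + 1, x, cc + 1) := by
        simp [altStep, hbr]
      rw [hstep]
      simp only [InvP]
      refine ⟨by simp, ?_, by rw [hcnt_x]; omega, by simp, by rw [hcnt_x]; omega, ?_⟩
      · intro y hy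
        rcases List.mem_append.mp hy with hy | hy
        · exact hle y hy
        · simp at hy; omega
      · intro y hy
        rw [hcnt_x, hcnt y]
        rcases List.mem_append.mp hy with hy | hy
        · by_cases hyx : y = x
          · subst hyx; right; exact ⟨by simp, le_refl _⟩
          · rw [if_neg hyx]
            have hyb : seen.count y ≤ seen.count bv := by
              rcases hdom y hy with h | ⟨h, _⟩ <;> omega
            by_cases heq : seen.count y = seen.count x + 1
            · right; exact ⟨by omega, hle y hy⟩
            · left; omega
        · simp at hy; subst hy; right; exact ⟨by simp, le_refl _⟩
    · -- keep best; bv ≠ x, else bc = cc ≤ cc + 1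
      have hne : bv ≠ x := by intro h; subst h; omega
      have hstep : altStep (x, cc, bv, bc) x = (x, cc + 1, bv, bc) := by
        simp [altStep, hbr]
      rw [hstep]
      have hcnt_bv : (seen ++ [x]).count bv = seen.count bv := by
        rw [hcnt, if_neg hne]; omega
      simp only [InvP]
      refine ⟨by simp, ?_, by rw [hcnt_x]; omega, by simp [hbv], by rw [hcnt_bv]; omega, ?_⟩
      · intro y hy
        rcases List.mem_append.mp hy with hy | hy
        · exact hle y hy
        · simp at hy; omega
      · intro y hy
        rw [hcnt_bv, hcnt y]
        rcases List.mem_append.mp hy with hy | hy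
        · by_cases hyx : y = x
          · subst hyx; rw [if_pos rfl]; left; omega
          · rw [if_neg hyx]
            rcases hdom y hy with h | ⟨h, h2⟩
            · left; omega
            · right; exact ⟨by omega, h2⟩
        · simp at hy; subst hy; rw [if_pos rfl]; left; omega
  · -- a new run starts at x; x ∉ seen since everything in seen is ≤ cv < x
    have hcvx : cv < x := lt_of_le_of_ne (hx cv hcv) (fun h => hxc h.symm)
    have hxnot : x ∉ seen := fun h => absurd (hle x h) (not_le.mpr hcvx)
    have hcnt_x : (seen ++ [x]).count x = 1 := by
      rw [hcnt, if_pos rfl, List.count_eq_zero_of_not_mem hxnot]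
    have hcnt_o : ∀ y ∈ seen, (seen ++ [x]).count y = seen.count y := by
      intro y hy
      have hne : ¬ y = x := by intro h; subst h; exact hxnot hy
      rw [hcnt, if_neg hne]; omega
    have hbc1 : (1 : Int) ≤ bc := by
      have := List.count_pos_iff.mpr hbv; omega
    by_cases hbr : bc ≤ (1 : Int)
    · have hstep : altStep (cv, cc, bv, bc) x = (x, 1, x, 1) := by
        simp [altStep, hxc, hbr]
      rw [hstep]
      simp only [InvP]
      refine ⟨by simp, ?_, by rw [hcnt_x]; omega, by simp, by rw [hcnt_x]; omega, ?_⟩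
      · intro y hy
        rcases List.mem_append.mp hy with hy | hy
        · exact hx y hy
        · simp at hy; omega
      · intro y hy
        rw [hcnt_x]
        rcases List.mem_append.mp hy with hy | hy
        · rw [hcnt_o y hy]
          have hyb : seen.count y ≤ seen.count bv := by
            rcases hdom y hy with h | ⟨h, _⟩ <;> omega
          by_cases heq : seen.count y = 1
          · right; exact ⟨heq, hx y hy⟩
          · left; omega
        · simp at hy; subst hy; right; exact ⟨hcnt_x, le_refl _⟩
    · have hstep : altStep (cv, cc, bv, bc) x = (x, 1, bv, bc) := by
        simp [altStep, hxc, hbr]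
      rw [hstep]
      have hbvne : bv ≠ x := fun h => absurd (h ▸ hbv) hxnot
      have hcnt_bv : (seen ++ [x]).count bv = seen.count bv := hcnt_o bv hbv
      simp only [InvP]
      refine ⟨by simp, ?_, by rw [hcnt_x]; rfl, by simp [hbv], by rw [hcnt_bv]; omega, ?_⟩
      · intro y hy
        rcases List.mem_append.mp hy with hy | hy
        · exact hx y hy
        · simp at hy; omega
      · intro y hy
        rw [hcnt_bv]
        rcases List.mem_append.mp hy with hy | hy
        · rw [hcnt_o y hy]; exact hdom y hy
        · simp at hy; subst hy; rw [hcnt_x]; left; omega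

lemma fold_inv (rest : List Int) : ∀ (seen : List Int) (s : Int × Int × Int × Int),
    (seen ++ rest).Pairwise (· ≤ ·) → InvP seen s → InvP (seen ++ rest) (rest.foldl altStep s) := by
  induction rest with
  | nil => intro seen s _ h; simpa using h
  | cons x t ih =>
    intro seen s hsort hinv
    have hx : ∀ y ∈ seen, y ≤ x := by
      intro y hy
      exact (List.pairwise_append.mp hsort).2.2 y hy x List.mem_cons_self
    have hstep := step_inv seen s x hx hinv
    have hsort' : ((seen ++ [x]) ++ t).Pairwise (· ≤ ·) := by
      rw [List.append_assoc]; simpa using hsort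
    have := ih (seen ++ [x]) (altStep s x) hsort' hstep
    simpa [List.append_assoc] using this

-- B returns the dominating element.
lemma B_isAns (xs : List Int) (hxs : xs ≠ []) : IsAns xs (calculate_overall_match_alt xs) := by
  unfold calculate_overall_match_alt
  rw [if_neg hxs]
  have hperm : (PySem.List.sorted xs (fun y => y)).Perm xs := PySem.List.sorted_perm xs _ _
  have hpair : (PySem.List.sorted xs (fun y => y)).Pairwise (· ≤ ·) :=
    PySem.List.sorted_pairwise xs _
  cases hs : PySem.List.sorted xs (fun y => y) with
  | nil =>
    rw [hs] at hperm
    exact absurd (List.Perm.eq_nil hperm.symm) hxs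
  | cons x0 rest =>
    rw [hs] at hperm hpair
    have hinv0 : InvP [x0] (x0, 1, x0, 1) := by
      simp only [InvP]
      refine ⟨by simp, ?_, by simp, by simp, by simp, ?_⟩
      · intro y hy; simp at hy; omega
      · intro y hy; simp at hy; subst hy; right; simp
    have hres := fold_inv rest [x0] (x0, 1, x0, 1) (by simpa using hpair) hinv0
    simp only [InvP] at hres
    obtain ⟨_, _, _, hbv, _, hdom⟩ := hres
    simp only [List.singleton_append] at hbv hdom
    constructor
    · exact hperm.mem_iff.mp hbv
    · intro y hy
      have hy' : y ∈ x0 :: rest := hperm.mem_iff.mpr hy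
      have := hdom y hy'
      rw [hperm.count_eq, hperm.count_eq] at this
      exact this

-- A returns the dominating element.
lemma A_isAns (xs : List Int) (hxs : xs ≠ []) : IsAns xs (calculate_overall_match xs) := by
  unfold calculate_overall_match
  rw [if_neg hxs]
  simp only []
  have hitems : (PySem.Dict.counter xs).items
      = (PySem.Set.ofList xs).map (fun k => (k, (xs.count k : Int))) :=
    PySem.Dict.items_counter xs
  have hvals : (PySem.Dict.counter xs).values
      = (PySem.Set.ofList xs).map (fun k => (xs.count k : Int)) := by
    simp only [PySem.Dict.values, hitems, List.map_map]; rfl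
  have hSne : PySem.Set.ofList xs ≠ [] := by
    cases xs with
    | nil => exact absurd rfl hxs
    | cons a t =>
      intro h
      have : a ∈ PySem.Set.ofList (a :: t) := by
        rw [PySem.Set.mem_ofList]; exact List.mem_cons_self
      simp [h] at this
  have hvne : (PySem.Dict.counter xs).values ≠ [] := by
    rw [hvals]; simpa using hSne
  set mfo := PySem.List.max? (PySem.Dict.counter xs).values (fun y => y) with hmfo
  cases hmf : mfo with
  | none => rw [hmfo, PySem.List.max?_eq_none_iff] at hmf; exact absurd hmf hvne
  | some mf =>
    have hmfmem : mf ∈ (PySem.Dict.counter xs).values := PySem.List.max?_mem (hmfo ▸ hmf)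
    have hmfmax : ∀ y ∈ (PySem.Dict.counter xs).values, y ≤ mf :=
      fun y hy => PySem.List.max?_isMax (hmfo ▸ hmf) y hy
    have hcountle : ∀ y ∈ xs, (xs.count y : Int) ≤ mf := by
      intro y hy
      apply hmfmax
      rw [hvals]
      exact List.mem_map.mpr ⟨y, (PySem.Set.mem_ofList xs y).mpr hy, rfl⟩
    have hmfwit : ∃ k ∈ xs, (xs.count k : Int) = mf := by
      rw [hvals] at hmfmem
      obtain ⟨k, hk, hkc⟩ := List.mem_map.mp hmfmem
      exact ⟨k, (PySem.Set.mem_ofList xs k).mp hk, hkc⟩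
    simp only [Option.getD_some]
    by_cases h1 : mf = 1
    · rw [if_pos h1]
      -- all unique: every count is 1; the answer is max(xs)
      have hall1 : ∀ y ∈ xs, xs.count y = 1 := by
        intro y hy
        have hle := hcountle y hy
        have := List.count_pos_iff.mpr hy
        omega
      cases hM : PySem.List.max? xs (fun y => y) with
      | none => rw [PySem.List.max?_eq_none_iff] at hM; exact absurd hM hxs
      | some m =>
        simp only [Option.getD_some]
        have hmmem := PySem.List.max?_mem hM
        have hmmax := fun y hy => PySem.List.max?_isMax hM y hy
        exact ⟨hmmem, fun y hy => Or.inr ⟨by rw [hall1 y hy, hall1 m hmmem], hmmax y hy⟩⟩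
    · rw [if_neg h1]
      -- mode case: the maximum over the keys of maximal count
      set modes := ((PySem.Dict.counter xs).items.filter (fun p => p.2 == mf)).map (fun p => p.1) with hmodes
      have hmem_modes : ∀ k, k ∈ modes ↔ k ∈ xs ∧ (xs.count k : Int) = mf := by
        intro k
        rw [hmodes, hitems]
        constructor
        · intro hk
          obtain ⟨p, hpf, hpk⟩ := List.mem_map.mp hk
          obtain ⟨hpm, hpc⟩ := List.mem_filter.mp hpf
          obtain ⟨k', hk'S, hpk'⟩ := List.mem_map.mp hpm
          subst hpk'
          simp only at hpk
          subst hpk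
          exact ⟨(PySem.Set.mem_ofList xs k').mp hk'S, by simpa using hpc⟩
        · intro ⟨hk, hkc⟩
          refine List.mem_map.mpr ⟨(k, (xs.count k : Int)), List.mem_filter.mpr ⟨?_, by simpa using hkc⟩, rfl⟩
          exact List.mem_map.mpr ⟨k, (PySem.Set.mem_ofList xs k).mpr hk, rfl⟩
      have hmodne : modes ≠ [] := by
        obtain ⟨k, hk, hkc⟩ := hmfwit
        intro h
        have := (hmem_modes k).mpr ⟨hk, hkc⟩
        simp [h] at this
      cases hM : PySem.List.max? modes (fun y => y) with
      | none => rw [PySem.List.max?_eq_none_iff] at hM; exact absurd hM hmodne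
      | some m =>
        simp only [Option.getD_some]
        have hmmem := PySem.List.max?_mem hM
        have hmmax := fun y hy => PySem.List.max?_isMax hM y hy
        obtain ⟨hmx, hmc⟩ := (hmem_modes m).mp hmmem
        refine ⟨hmx, fun y hy => ?_⟩
        by_cases hyc : (xs.count y : Int) = mf
        · exact Or.inr ⟨by omega, hmmax y ((hmem_modes y).mpr ⟨hy, hyc⟩)⟩
        · left
          have := hcountle y hy
          omega

-- ===== VERDICT (by name: the statement is the Claim_ definition above) =====
theorem calculate_overall_match_spec : Claim_equal_calculate_overall_match := by
  intro xs _
  unfold Spec_calculate_overall_match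
  by_cases hxs : xs = []
  · subst hxs; rfl
  · exact IsAns_unique xs _ _ (A_isAns xs hxs) (B_isAns xs hxs)
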